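-- pv_equiv track=rewrite | github.com/endygamedev/fuzzer-maze-solver | maze.py | print_maze
-- ===== SOURCE A (Python) =====
-- def print_maze(out, row, col):
--     output = out + "\n"
--     c_row = 0
--     c_col = 0
--     for c in list(
--         """
-- +-+-----+
-- |X|     |
-- | | --+ |
-- | |   | |
-- | +-- | |
-- |     |#|
-- +-----+-+
-- """
--     ):
--         if c == "\n":
--             c_row += 1
--             c_col = 0
--             output += "\n"
--         else:
--             if c_row == row and c_col == col:
--                 output += "X"
--             elif c == "X":
--                 output += " "
--             else:
--                 output += c
--             c_col += 1
--     return output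
-- ===== SOURCE B (Python) =====
-- MAZE = """
-- +-+-----+
-- |X|     |
-- | | --+ |
-- | |   | |
-- | +-- | |
-- |     |#|
-- +-----+-+
-- """
--
--
-- def print_maze(out, row, col):
--     lines = [line.replace("X", " ") for line in MAZE.split("\n")]
--     if 0 <= row < len(lines) and 0 <= col < len(lines[row]):
--         chars = list(lines[row])
--         chars[col] = "X"
--         lines[row] = "".join(chars)
--     return out + "\n" + "\n".join(lines)
-- ===== Notes on version B (the rewrite author's own statement) =====
-- stated objective: simpler
-- what changed: Replaced A's character-by-character scan with c_row/c_col counters and a per-cell three-way branch by a line-oriented rewrite: split the fixed maze on newlines, blanket-replace 'X' with ' ', perform one range-checked indexed write of 'X', and rejoin.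
import Mathlib
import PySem

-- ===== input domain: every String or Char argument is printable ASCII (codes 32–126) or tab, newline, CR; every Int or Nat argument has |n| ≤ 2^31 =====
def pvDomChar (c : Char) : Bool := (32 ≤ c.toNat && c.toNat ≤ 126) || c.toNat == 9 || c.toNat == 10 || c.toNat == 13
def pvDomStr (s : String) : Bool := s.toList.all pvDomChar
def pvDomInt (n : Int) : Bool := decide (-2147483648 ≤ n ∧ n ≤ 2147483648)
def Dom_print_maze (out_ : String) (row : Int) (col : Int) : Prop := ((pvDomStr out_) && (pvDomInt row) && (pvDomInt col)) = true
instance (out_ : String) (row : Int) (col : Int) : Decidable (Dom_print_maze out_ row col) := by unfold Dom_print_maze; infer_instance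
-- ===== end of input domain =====

-- B replaces A's character-by-character scan (with per-cell row/column counters) by a
-- line-oriented rewrite: split the fixed maze on '\n', blanket-replace 'X' by ' ', do one
-- indexed write of 'X' when (row, col) is in range, and rejoin — simpler, no counters.

-- the fixed maze string of the source module (leading and trailing newline included)
def pvMaze : String := "\n+-+-----+\n|X|     |\n| | --+ |\n| |   | |\n| +-- | |\n|     |#|\n+-----+-+\n"

-- ===== PORT A =====
-- the for-loop of A: state (c_row, c_col, output); output kept as List Char (string concat = list append)
def printMazeLoop (cs : List Char) (crow ccol row col : Int) (acc : List Char) : List Char :=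
  match cs with
  | [] => acc
  | c :: rest =>
    if c = '\n' then
      printMazeLoop rest (crow + 1) 0 row col (acc ++ ['\n'])
    else
      printMazeLoop rest crow (ccol + 1) row col
        (acc ++ [if crow = row ∧ ccol = col then 'X' else if c = 'X' then ' ' else c])

def print_maze (out_ : String) (row : Int) (col : Int) : String :=
  String.ofList (printMazeLoop pvMaze.toList 0 0 row col (out_.toList ++ ['\n']))

-- ===== PORT B =====
-- B-side helpers: lines = [l.replace('X',' ') for l in MAZE.split('\n')]
def pvLines : List (List Char) :=
  (PySem.Chars.splitOn pvMaze.toList ['\n']).map (fun l => PySem.Chars.replace l ['X'] [' '])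

-- the conditional indexed write of B (guard makes the index access safe, as in Source B)
def pvLines' (row col : Int) : List (List Char) :=
  if 0 ≤ row ∧ row < (pvLines.length : Int) ∧ 0 ≤ col ∧ col < ((pvLines.getD row.toNat []).length : Int)
  then pvLines.set row.toNat ((pvLines.getD row.toNat []).set col.toNat 'X')
  else pvLines

def print_maze_alt (out_ : String) (row : Int) (col : Int) : String :=
  String.ofList (out_.toList ++ '\n' :: PySem.Chars.join ['\n'] (pvLines' row col))

-- ===== PRECONDITION & SPEC =====
def Spec_print_maze (out_ : String) (row : Int) (col : Int) (out : String) : Prop := out = print_maze_alt out_ row col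
instance (out_ : String) (row : Int) (col : Int) (out : String) : Decidable (Spec_print_maze out_ row col out) := by unfold Spec_print_maze; infer_instance

-- ===== CLAIM (what is proved, stated in full; the proofs are below) =====
def Claim_equal_print_maze : Prop := ∀ (out_ : String) (row : Int) (col : Int), Dom_print_maze out_ row col → Spec_print_maze out_ row col (print_maze out_ row col)

-- ===== LEMMAS AND PROOFS =====

-- A's loop with the mark condition never firing: plain 'X'→' ' rewrite of the maze
def pvBlankLoop : List Char → List Char → List Char
  | [], acc => acc
  | c :: rest, acc => pvBlankLoop rest (acc ++ [if c = 'X' then ' ' else c])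

-- every line of cs (current column offset cc) stays within 9 columns
def pvLinesLE : List Char → Nat → Bool
  | [], _ => true
  | c :: rest, cc => if c = '\n' then pvLinesLE rest 0 else decide (cc + 1 ≤ 9) && pvLinesLE rest (cc + 1)

theorem pvLoop_acc (cs : List Char) : ∀ (cr cc row col : Int) (acc : List Char),
    printMazeLoop cs cr cc row col acc = acc ++ printMazeLoop cs cr cc row col [] := by
  induction cs with
  | nil => intro cr cc row col acc; simp [printMazeLoop]
  | cons c rest ih =>
    intro cr cc row col acc
    by_cases h : c = '\n'
    · simp only [printMazeLoop, if_pos h]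
      rw [ih _ _ _ _ (acc ++ ['\n']), ih _ _ _ _ ([] ++ ['\n'])]
      simp
    · simp only [printMazeLoop, if_neg h]
      rw [ih _ _ _ _ (acc ++ _), ih _ _ _ _ ([] ++ _)]
      simp

theorem pvLoop_blank (row col : Int) (hout : row < 0 ∨ col < 0 ∨ 8 < row ∨ 10 ≤ col) :
    ∀ (cs : List Char) (cr : Int) (ccN : Nat) (acc : List Char),
      0 ≤ cr → cr + (cs.count '\n' : Int) ≤ 8 → pvLinesLE cs ccN = true →
      printMazeLoop cs cr (ccN : Int) row col acc = pvBlankLoop cs acc := by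
  intro cs
  induction cs with
  | nil => intro cr ccN acc _ _ _; simp [printMazeLoop, pvBlankLoop]
  | cons c rest ih =>
    intro cr ccN acc h0 hcnt hle
    by_cases h : c = '\n'
    · subst h
      simp only [printMazeLoop, pvBlankLoop]
      have hcnt' : cr + 1 + (rest.count '\n' : Int) ≤ 8 := by
        simp at hcnt; omega
      have hle' : pvLinesLE rest 0 = true := by simpa [pvLinesLE] using hle
      have := ih (cr + 1) 0 (acc ++ ['\n']) (by omega) hcnt' hle'
      simpa using this
    · simp only [pvLinesLE, if_neg h, Bool.and_eq_true, decide_eq_true_eq] at hle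
      obtain ⟨hcc, hle'⟩ := hle
      have hcond : ¬(cr = row ∧ (ccN : Int) = col) := by
        rintro ⟨h1, h2⟩
        have hcnt9 : (ccN : Int) ≤ 8 := by exact_mod_cast Nat.le_of_lt_succ (by omega)
        omega
      simp only [printMazeLoop, pvBlankLoop, if_neg h, if_neg hcond]
      have hcnt' : cr + (rest.count '\n' : Int) ≤ 8 := by
        simp [h] at hcnt ⊢; omega
      have := ih cr (ccN + 1) (acc ++ [if c = 'X' then ' ' else c]) h0 hcnt' hle'
      push_cast at this
      exact this

theorem pvCore (row col : Int) :
    printMazeLoop pvMaze.toList 0 0 row col [] = PySem.Chars.join ['\n'] (pvLines' row col) := by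
  by_cases hbox : 0 ≤ row ∧ row ≤ 8 ∧ 0 ≤ col ∧ col ≤ 9
  · obtain ⟨h1, h2, h3, h4⟩ := hbox
    interval_cases row <;> interval_cases col <;> decide
  · have hout : row < 0 ∨ col < 0 ∨ 8 < row ∨ 10 ≤ col := by omega
    have hcnt : (0 : Int) + (pvMaze.toList.count '\n' : Int) ≤ 8 := by
      have : pvMaze.toList.count '\n' = 8 := by decide
      rw [this]; omega
    have hle : pvLinesLE pvMaze.toList 0 = true := by decide
    have hblank := pvLoop_blank row col hout pvMaze.toList 0 0 [] (by omega) hcnt hle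
    have hneg : ¬(0 ≤ row ∧ row < (pvLines.length : Int) ∧ 0 ≤ col ∧
        col < ((pvLines.getD row.toNat []).length : Int)) := by
      rintro ⟨c1, c2, c3, c4⟩
      have e1 : (pvLines.length : Int) = 9 := by decide
      rw [e1] at c2
      have hb : ((pvLines.getD row.toNat []).length : Int) ≤ 9 := by
        have hall : ∀ n : Nat, (pvLines.getD n []).length ≤ 9 := by
          intro n
          match n with
          | 0 | 1 | 2 | 3 | 4 | 5 | 6 | 7 | 8 => decide
          | n + 9 =>
            rw [List.getD_eq_default _ _ (by rw [show pvLines.length = 9 from by decide]; omega)]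
            simp
        exact_mod_cast hall row.toNat
      omega
    unfold pvLines'
    rw [if_neg hneg]
    calc printMazeLoop pvMaze.toList 0 0 row col []
        = pvBlankLoop pvMaze.toList [] := by exact_mod_cast hblank
      _ = PySem.Chars.join ['\n'] pvLines := by decide

-- ===== VERDICT (by name: the statement is the Claim_ definition above) =====
theorem print_maze_spec : Claim_equal_print_maze := by
  intro out_ row col _
  unfold Spec_print_maze print_maze print_maze_alt
  rw [pvLoop_acc, pvCore]
  simp
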